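-- pv_equiv track=rewrite | github.com/RuidaH/CITS1401-2019 | Final Exam/Solution to Final Exam.py | marksDistribution
-- ===== SOURCE A (Python) =====
-- def marksDistribution(D):
--
--     grades = {}
--
--     for mark in D:
--
--         if D[mark] >= 80:
--             grades["HD"] = grades.get("HD", 0) + 1
--
--         elif D[mark] >= 70:
--             grades["D"] = grades.get("D", 0) + 1
--
--         elif D[mark] >= 60:
--             grades["Cr"] = grades.get("Cr", 0) + 1
--
--         elif D[mark] >= 50:
--             grades["P"] = grades.get("P", 0) + 1
--
--         else:
--             grades["N"] = grades.get("N", 0) + 1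
--
--     return grades
-- ===== SOURCE B (Python) =====
-- def _bisect_right(a, x):
--     # rightmost insertion point for x in sorted list a (binary search)
--     lo, hi = 0, len(a)
--     while lo < hi:
--         mid = (lo + hi) // 2
--         if x < a[mid]:
--             hi = mid
--         else:
--             lo = mid + 1
--     return lo
--
--
-- def marksDistribution(D):
--     thresholds = [50, 60, 70, 80]
--     names = ["N", "P", "Cr", "D", "HD"]
--     grades = {}
--     for mark in D.values():
--         name = names[_bisect_right(thresholds, mark)]
--         grades[name] = grades.get(name, 0) + 1
--     return grades
-- ===== Notes on version B (the rewrite author's own statement) =====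
-- stated objective: idiomatic
-- what changed: A's four-way if/elif comparison cascade with a dict lookup per key is replaced by a single pass over the values that picks the grade label via a binary search (hand-written bisect_right) over a sorted threshold table [50,60,70,80] with a parallel label list.
import Mathlib
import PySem

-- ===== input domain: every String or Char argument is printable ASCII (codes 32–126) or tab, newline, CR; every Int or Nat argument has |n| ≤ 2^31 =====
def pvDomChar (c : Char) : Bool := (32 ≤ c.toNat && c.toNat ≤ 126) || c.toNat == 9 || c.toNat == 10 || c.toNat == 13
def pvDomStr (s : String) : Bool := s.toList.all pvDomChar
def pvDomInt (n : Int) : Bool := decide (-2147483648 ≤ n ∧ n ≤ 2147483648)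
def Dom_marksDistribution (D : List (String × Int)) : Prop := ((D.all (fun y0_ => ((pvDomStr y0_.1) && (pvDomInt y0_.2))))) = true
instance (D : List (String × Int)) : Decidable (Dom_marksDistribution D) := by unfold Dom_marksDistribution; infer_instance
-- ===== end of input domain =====

-- B replaces A's if/elif comparison cascade by a binary search over a sorted
-- threshold table with a parallel label list (objective: idiomatic/alternative).

-- ===== PORT A =====
-- 'for mark in D: ... D[mark] ...' — iterate the keys, look the value up in the dict.
def marksDistribution (D : List (String × Int)) : List (String × Int) :=
  ((D.map Prod.fst).foldl (fun grades mark =>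
    let m := (PySem.Dict.mk D).getD mark 0   -- D[mark]; the key is always present
    if m ≥ 80 then grades.insert "HD" (grades.getD "HD" 0 + 1)
    else if m ≥ 70 then grades.insert "D" (grades.getD "D" 0 + 1)
    else if m ≥ 60 then grades.insert "Cr" (grades.getD "Cr" 0 + 1)
    else if m ≥ 50 then grades.insert "P" (grades.getD "P" 0 + 1)
    else grades.insert "N" (grades.getD "N" 0 + 1)) PySem.Dict.empty).items

-- ===== PORT B =====
-- hand-written _bisect_right loop from Source B, step for step (lo/hi binary search)
def bisectRightB (a : List Int) (x : Int) (lo hi : Nat) : Nat :=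
  if lo < hi then
    let mid := (lo + hi) / 2
    if x < a.getD mid 0 then bisectRightB a x lo mid
    else bisectRightB a x (mid + 1) hi
  else lo
  termination_by hi - lo
  decreasing_by all_goals omega

def marksDistribution_alt (D : List (String × Int)) : List (String × Int) :=
  let thresholds : List Int := [50, 60, 70, 80]
  let names : List String := ["N", "P", "Cr", "D", "HD"]
  (D.foldl (fun grades p =>
    let name := names.getD (bisectRightB thresholds p.2 0 thresholds.length) ""
    grades.insert name (grades.getD name 0 + 1)) PySem.Dict.empty).items

-- ===== PRECONDITION & SPEC =====
-- Pre_ excludes association lists with duplicate keys: a Python dict cannot hold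
-- them, so the list ports' behaviour there (first-match lookup, every occurrence
-- counted) is an accident of the list representation, not A's behaviour.
def Pre_marksDistribution (D : List (String × Int)) : Prop := (D.map Prod.fst).Nodup
instance (D : List (String × Int)) : Decidable (Pre_marksDistribution D) := by unfold Pre_marksDistribution; infer_instance
def pvWitness_marksDistribution : (List (String × Int)) := [("alice", 83), ("bob", 47), ("carol", 65)]

def Spec_marksDistribution (D : List (String × Int)) (out : List (String × Int)) : Prop := out = marksDistribution_alt D
instance (D : List (String × Int)) (out : List (String × Int)) : Decidable (Spec_marksDistribution D out) := by unfold Spec_marksDistribution; infer_instance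

-- ===== CLAIM (what is proved, stated in full; the proofs are below) =====
def Claim_equal_marksDistribution : Prop := ∀ (D : List (String × Int)), Dom_marksDistribution D → Pre_marksDistribution D → Spec_marksDistribution D (marksDistribution D)

-- ===== LEMMAS AND PROOFS =====

-- the table lookup through the binary search equals A's comparison cascade
lemma bisect_label_eq (v : Int) :
    (["N", "P", "Cr", "D", "HD"].getD (bisectRightB [50, 60, 70, 80] v 0 4) "")
      = (if v ≥ 80 then "HD" else if v ≥ 70 then "D" else if v ≥ 60 then "Cr"
         else if v ≥ 50 then "P" else "N") := by
  split_ifs with h80 h70 h60 h50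
  · rw [show bisectRightB [50, 60, 70, 80] v 0 4 = 4 from by
      simp [bisectRightB, show ¬ v < 70 by omega, show ¬ v < 80 by omega]]; rfl
  · rw [show bisectRightB [50, 60, 70, 80] v 0 4 = 3 from by
      simp [bisectRightB, show ¬ v < 70 by omega, show v < 80 by omega]]; rfl
  · rw [show bisectRightB [50, 60, 70, 80] v 0 4 = 2 from by
      simp [bisectRightB, show v < 70 by omega, show ¬ v < 60 by omega]]; rfl
  · rw [show bisectRightB [50, 60, 70, 80] v 0 4 = 1 from by
      simp [bisectRightB, show v < 70 by omega, show v < 60 by omega, show ¬ v < 50 by omega]]; rfl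
  · rw [show bisectRightB [50, 60, 70, 80] v 0 4 = 0 from by
      simp [bisectRightB, show v < 70 by omega, show v < 60 by omega, show v < 50 by omega]]; rfl

lemma fold_eq (D : List (String × Int)) (hnd : (D.map Prod.fst).Nodup) :
    ∀ (L : List (String × Int)), (∀ p ∈ L, p ∈ D) →
    ∀ (acc : PySem.Dict String Int),
      (L.map Prod.fst).foldl (fun grades mark =>
        let m := (PySem.Dict.mk D).getD mark 0
        if m ≥ 80 then grades.insert "HD" (grades.getD "HD" 0 + 1)
        else if m ≥ 70 then grades.insert "D" (grades.getD "D" 0 + 1)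
        else if m ≥ 60 then grades.insert "Cr" (grades.getD "Cr" 0 + 1)
        else if m ≥ 50 then grades.insert "P" (grades.getD "P" 0 + 1)
        else grades.insert "N" (grades.getD "N" 0 + 1)) acc
      = L.foldl (fun grades p =>
          let name := ["N", "P", "Cr", "D", "HD"].getD (bisectRightB [50, 60, 70, 80] p.2 0 4) ""
          grades.insert name (grades.getD name 0 + 1)) acc := by
  intro L
  induction L with
  | nil => intro _ _; rfl
  | cons p L ih =>
    intro hmem acc
    have hpD : p ∈ D := hmem p (List.mem_cons_self ..)
    have hget : (PySem.Dict.mk D).getD p.1 0 = p.2 := by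
      exact PySem.Dict.getD_of_mem_items (PySem.Dict.mk D) (k := p.1) (v := p.2) hpD hnd 0
    simp only [List.map_cons, List.foldl_cons]
    rw [ih (fun q hq => hmem q (List.mem_cons_of_mem _ hq))]
    congr 1
    simp only [hget, bisect_label_eq]
    split_ifs <;> rfl

-- ===== VERDICT (by name: the statement is the Claim_ definition above) =====
theorem marksDistribution_spec : Claim_equal_marksDistribution := by
  intro D _ hnd
  unfold Spec_marksDistribution marksDistribution marksDistribution_alt
  congr 1
  exact fold_eq D hnd D (fun _ h => h) PySem.Dict.empty
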